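-- pv_equiv track=rewrite | github.com/verystrongjoe/elf-replay-clustering | example.py | color_red
-- ===== SOURCE A (Python) =====
-- def color_red(data):
--     max_len = len(data)
--     fmt = 'color: red'
--     lst = []
--     for i, v in enumerate(data):
--         if (v != 0) and (i == max_len-1):
--             lst.append(fmt)
--         elif (v != 0) and (data[i+1] == 0):
--             lst.append(fmt)
--         else:
--             lst.append('')
--     return lst
-- ===== SOURCE B (Python) =====
-- def color_red(data):
--     res = []
--     next_is_zero = True
--     for v in reversed(data):
--         res.append('color: red' if v != 0 and next_is_zero else '')
--         next_is_zero = (v == 0)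
--     res.reverse()
--     return res
-- ===== Notes on version B (the rewrite author's own statement) =====
-- stated objective: alternative
-- what changed: Replaces A's forward enumerate pass with index lookahead (data[i+1]) and a last-index special case by a single backward pass carrying a 'next element is zero' boolean flag, with no indexing at all.
import Mathlib
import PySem

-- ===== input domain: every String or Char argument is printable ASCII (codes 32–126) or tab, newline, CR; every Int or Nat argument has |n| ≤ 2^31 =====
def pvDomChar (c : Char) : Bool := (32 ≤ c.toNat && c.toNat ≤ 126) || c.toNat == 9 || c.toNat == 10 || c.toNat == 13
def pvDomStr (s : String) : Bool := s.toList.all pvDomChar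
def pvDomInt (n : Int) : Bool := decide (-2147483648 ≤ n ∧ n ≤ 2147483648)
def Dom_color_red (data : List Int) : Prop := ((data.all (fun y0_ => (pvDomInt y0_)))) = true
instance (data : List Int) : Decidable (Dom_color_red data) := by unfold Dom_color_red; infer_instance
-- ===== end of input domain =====

-- B replaces A's forward pass with index lookahead by a backward pass carrying a
-- "next element is zero" flag (objective: alternative; return value only, no mutation).

-- ===== PORT A =====
def color_red (data : List Int) : List String :=
  let maxLen := data.length
  let fmt := "color: red"
  let lst : List String := []
  (PySem.List.enumerate data).foldl
    (fun lst (p : Int × Int) =>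
      if p.2 ≠ 0 ∧ p.1 = (maxLen : Int) - 1 then lst ++ [fmt]
      else if p.2 ≠ 0 ∧ PySem.List.pyGet? data (p.1 + 1) = some 0 then lst ++ [fmt]
      else lst ++ [""]) lst

-- ===== PORT B =====
def color_red_alt (data : List Int) : List String :=
  let st := data.reverse.foldl
    (fun (st : List String × Bool) v =>
      (st.1 ++ [if v ≠ 0 ∧ st.2 = true then "color: red" else ""], v == 0))
    ([], true)
  st.1.reverse

-- ===== PRECONDITION & SPEC =====
def Spec_color_red (data : List Int) (out : List String) : Prop := out = color_red_alt data
instance (data : List Int) (out : List String) : Decidable (Spec_color_red data out) := by unfold Spec_color_red; infer_instance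

-- ===== CLAIM (what is proved, stated in full; the proofs are below) =====
def Claim_equal_color_red : Prop := ∀ (data : List Int), Dom_color_red data → Spec_color_red data (color_red data)

-- ===== LEMMAS AND PROOFS =====

/-- Common characterisation: an element is marked iff it is nonzero and it is
last or followed by a zero. -/
def aspec : List Int → List String
  | [] => []
  | v :: rest =>
      (if v ≠ 0 ∧ (rest = [] ∨ rest.head? = some 0) then "color: red" else "") :: aspec rest

/-- A's step condition, as a per-element function of the full list. -/
def gA (data : List Int) (p : Int × Int) : String :=
  if p.2 ≠ 0 ∧ p.1 = (data.length : Int) - 1 then "color: red"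
  else if p.2 ≠ 0 ∧ PySem.List.pyGet? data (p.1 + 1) = some 0 then "color: red"
  else ""

lemma aside_gen (data : List Int) :
    ∀ (suf : List Int) (k : Nat), data.drop k = suf →
      (PySem.List.enumerate suf (k : Int)).map (gA data) = aspec suf := by
  intro suf
  induction suf with
  | nil => intro k _; simp [PySem.List.enumerate_nil, aspec]
  | cons v rest ih =>
    intro k hdrop
    have hk : k < data.length := by
      by_contra h
      have : data.drop k = [] := List.drop_eq_nil_of_le (by omega)
      simp [this] at hdrop
    have hlen : data.length - k = rest.length + 1 := by
      have := List.length_drop (l := data) (i := k)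
      rw [hdrop] at this; simpa using this.symm
    have hdrop' : data.drop (k + 1) = rest := by
      have : data.drop (k + 1) = (data.drop k).drop 1 := by
        rw [List.drop_drop]
      rw [this, hdrop]; rfl
    rw [PySem.List.enumerate_cons, List.map_cons]
    have hcast : (k : Int) + 1 = ((k + 1 : Nat) : Int) := by push_cast; ring
    rw [hcast, ih (k + 1) hdrop']
    congr 1
    -- head element
    have hget : PySem.List.pyGet? data ((k : Int) + 1) = rest.head? := by
      have h0 := List.getElem?_drop (xs := data) (i := k + 1) (j := 0)
      rw [hdrop'] at h0
      rw [hcast, PySem.List.pyGet?_natCast, List.head?_eq_getElem?]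
      simpa using h0.symm
    show gA data ((k : Int), v) = _
    simp only [gA, hget]
    by_cases hv : v = 0
    · simp [hv]
    · cases rest with
      | nil =>
        simp only [List.length_nil] at hlen
        have h1 : (k : Int) = (data.length : Int) - 1 := by omega
        simp [hv, h1]
      | cons w t =>
        have h1 : (k : Int) ≠ (data.length : Int) - 1 := by
          simp at hlen; omega
        by_cases hw : w = 0 <;> simp [hv, h1, hw]

lemma aside (data : List Int) : color_red data = aspec data := by
  have hstep :
      (fun (lst : List String) (p : Int × Int) =>
        if p.2 ≠ 0 ∧ p.1 = ((data.length : Nat) : Int) - 1 then lst ++ ["color: red"]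
        else if p.2 ≠ 0 ∧ PySem.List.pyGet? data (p.1 + 1) = some 0 then lst ++ ["color: red"]
        else lst ++ [""]) =
      (fun lst p => lst ++ [gA data p]) := by
    funext lst p; unfold gA; split_ifs <;> rfl
  show (PySem.List.enumerate data).foldl _ [] = _
  rw [hstep, PySem.List.foldl_append_singleton_eq_map]
  simpa using aside_gen data data 0 rfl

/-- B's loop body, run structurally on a list with an incoming flag. -/
def bRun : List Int → Bool → List String
  | [], _ => []
  | v :: rest, nz =>
      (if v ≠ 0 ∧ nz = true then "color: red" else "") :: bRun rest (v == 0)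

/-- The flag carried out of B's loop. -/
def flagEnd (l : List Int) (nz : Bool) : Bool :=
  l.foldl (fun _ v => v == 0) nz

lemma bfold (l : List Int) : ∀ (acc : List String) (nz : Bool),
    l.foldl (fun (st : List String × Bool) v =>
        (st.1 ++ [if v ≠ 0 ∧ st.2 = true then "color: red" else ""], v == 0)) (acc, nz)
      = (acc ++ bRun l nz, flagEnd l nz) := by
  induction l with
  | nil => intro acc nz; simp [bRun, flagEnd]
  | cons v rest ih =>
    intro acc nz
    simp only [List.foldl_cons, ih, bRun, flagEnd, List.foldl_cons]
    simp

lemma bRun_append (xs : List Int) : ∀ (ys : List Int) (nz : Bool),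
    bRun (xs ++ ys) nz = bRun xs nz ++ bRun ys (flagEnd xs nz) := by
  induction xs with
  | nil => intro ys nz; simp [bRun, flagEnd]
  | cons v rest ih =>
    intro ys nz
    simp only [List.cons_append, bRun, ih, flagEnd, List.foldl_cons]

lemma key (l : List Int) : bRun l.reverse true = (aspec l).reverse := by
  induction l with
  | nil => rfl
  | cons v rest ih =>
    rw [List.reverse_cons, bRun_append, ih]
    have hcons : aspec (v :: rest)
        = (if v ≠ 0 ∧ (rest = [] ∨ rest.head? = some 0) then "color: red" else "")
            :: aspec rest := rfl
    rw [hcons, List.reverse_cons]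
    congr 1
    cases rest with
    | nil => simp [bRun, flagEnd]
    | cons w t =>
      have hflag : flagEnd (w :: t).reverse true = (w == 0) := by
        unfold flagEnd
        rw [List.reverse_cons, List.foldl_append]
        rfl
      rw [hflag]
      by_cases hw : w = 0 <;> by_cases hv : v = 0 <;> simp [bRun, hv, hw]

lemma bside (data : List Int) : color_red_alt data = aspec data := by
  unfold color_red_alt
  simp only [bfold data.reverse [] true, List.nil_append, key]
  simp

-- ===== VERDICT (by name: the statement is the Claim_ definition above) =====
theorem color_red_spec : Claim_equal_color_red := by
  intro data _
  unfold Spec_color_red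
  rw [aside, bside]
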